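-- pv_equiv track=rewrite | github.com/fynn-noe/discord-bot | responses.py | removeSigns
-- ===== SOURCE A (Python) =====
-- def removeSigns(text):
--     newText = ""
--     notWrite = False
--     for i in text:
--         if i == '<' or i == '&' or i == '#':
--             notWrite = True
--         if notWrite == False:
--             newText += i
--         if i == '>' or i == ';':
--             notWrite = False
--     return newText
-- ===== SOURCE B (Python) =====
-- def removeSigns(text):
--     out = []
--     i = 0
--     n = len(text)
--     while i < n:
--         c = text[i]
--         if c == '<' or c == '&' or c == '#':
--             i += 1
--             while i < n and text[i] != '>' and text[i] != ';':
--                 i += 1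
--             i += 1  # skip the closing delimiter (or run off the end)
--         else:
--             out.append(c)
--             i += 1
--     return ''.join(out)
-- ===== Notes on version B (the rewrite author's own statement) =====
-- stated objective: alternative
-- what changed: Replaces the boolean suppress-flag state machine carried through a single flat loop with an index-based scan whose inner while-loop consumes an entire delimited region at once, collecting kept characters in a list joined at the end.
import Mathlib
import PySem

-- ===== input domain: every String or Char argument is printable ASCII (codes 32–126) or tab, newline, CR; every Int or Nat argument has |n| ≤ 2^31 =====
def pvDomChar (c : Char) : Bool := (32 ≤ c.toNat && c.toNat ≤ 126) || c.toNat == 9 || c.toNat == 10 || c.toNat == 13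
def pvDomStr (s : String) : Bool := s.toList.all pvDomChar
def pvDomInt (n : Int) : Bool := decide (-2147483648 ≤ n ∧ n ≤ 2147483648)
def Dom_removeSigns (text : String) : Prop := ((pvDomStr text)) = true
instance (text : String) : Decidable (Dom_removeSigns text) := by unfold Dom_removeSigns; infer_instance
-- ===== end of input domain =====

-- ===== PORT A =====
-- B changes: index scan with an inner region-consuming loop instead of a boolean-flag flat loop (objective: alternative).
def pvStepA (st : List Char × Bool) (i : Char) : List Char × Bool :=
  let notWrite := if i = '<' ∨ i = '&' ∨ i = '#' then true else st.2
  let newText := if notWrite = false then st.1 ++ [i] else st.1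
  let notWrite2 := if i = '>' ∨ i = ';' then false else notWrite
  (newText, notWrite2)

def removeSigns (text : String) : String :=
  String.mk ((text.toList.foldl pvStepA ([], false)).1)

-- ===== PORT B =====
-- inner `while` of Source B: consume characters up to and including the closing delimiter
def pvSkipClose : List Char → List Char
  | [] => []
  | c :: rest => if c = '>' ∨ c = ';' then rest else pvSkipClose rest

theorem pvSkipClose_length_le (l : List Char) : (pvSkipClose l).length ≤ l.length := by
  induction l with
  | nil => simp [pvSkipClose]
  | cons c rest ih =>
    simp only [pvSkipClose]
    split
    · simp
    · exact Nat.le_succ_of_le ih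

-- outer `while` of Source B
def pvAltGo : List Char → List Char
  | [] => []
  | c :: rest =>
    if c = '<' ∨ c = '&' ∨ c = '#' then pvAltGo (pvSkipClose rest)
    else c :: pvAltGo rest
termination_by l => l.length
decreasing_by
  · exact Nat.lt_succ_of_le (pvSkipClose_length_le rest)
  · exact Nat.lt_succ_self _

def removeSigns_alt (text : String) : String :=
  String.mk (pvAltGo text.toList)

-- ===== PRECONDITION & SPEC =====
def Spec_removeSigns (text : String) (out : String) : Prop := out = removeSigns_alt text
instance (text : String) (out : String) : Decidable (Spec_removeSigns text out) := by unfold Spec_removeSigns; infer_instance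

-- ===== CLAIM (what is proved, stated in full; the proofs are below) =====
def Claim_equal_removeSigns : Prop := ∀ (text : String), Dom_removeSigns text → Spec_removeSigns text (removeSigns text)

-- ===== LEMMAS AND PROOFS =====
theorem foldl_stepA (l : List Char) : ∀ (acc : List Char) (flag : Bool),
    (l.foldl pvStepA (acc, flag)).1 =
      acc ++ (if flag then pvAltGo (pvSkipClose l) else pvAltGo l) := by
  induction l with
  | nil => intro acc flag; cases flag <;> simp [pvAltGo, pvSkipClose]
  | cons c rest ih =>
    intro acc flag
    by_cases ho : c = '<' ∨ c = '&' ∨ c = '#'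
    · have hc : ¬ (c = '>' ∨ c = ';') := by rcases ho with h|h|h <;> simp [h]
      cases flag <;>
        simp [List.foldl_cons, pvStepA, ho, hc, ih, pvAltGo, pvSkipClose]
    · by_cases hc : c = '>' ∨ c = ';'
      · cases flag <;>
          simp [List.foldl_cons, pvStepA, ho, hc, ih, pvAltGo, pvSkipClose]
      · cases flag <;>
          simp [List.foldl_cons, pvStepA, ho, hc, ih, pvAltGo, pvSkipClose]

-- ===== VERDICT (by name: the statement is the Claim_ definition above) =====
theorem removeSigns_spec : Claim_equal_removeSigns := by
  intro text _
  unfold Spec_removeSigns removeSigns removeSigns_alt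
  simp [foldl_stepA]
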